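-- pv_equiv track=rewrite | github.com/Sh-Pe/cs-tau-shpe | src/extended-intro-to-computer-science/hw/cshw1/Code/hw1_334558962.py | is_int
-- ===== SOURCE A (Python) =====
-- def is_int(text: str) -> bool:
--     # edge cases. order matters.
--     if text == "0":
--         return True
--     if text == "" or text == "-":
--         return False
--     if text[0] == "-":
--         text = text[1:]
--     if text[0] == "0":
--         return False
--
--     digits = "1234567890"
--     output = all((char in digits for char in text))
--     return output
-- ===== SOURCE B (Python) =====
-- import re
--
-- _INT_RE = re.compile(r'0|-?[1-9][0-9]*')
--
-- def is_int(text: str) -> bool: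
--     return bool(_INT_RE.fullmatch(text))
-- ===== Notes on version B (the rewrite author's own statement) =====
-- stated objective: idiomatic
-- what changed: Replaced the guard ladder plus per-character all() scan with a single anchored regular expression (0|-?[1-9][0-9]*), i.e. a finite-automaton match; the Lean port of B is that automaton as an explicit DFA fold.
import Mathlib
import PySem

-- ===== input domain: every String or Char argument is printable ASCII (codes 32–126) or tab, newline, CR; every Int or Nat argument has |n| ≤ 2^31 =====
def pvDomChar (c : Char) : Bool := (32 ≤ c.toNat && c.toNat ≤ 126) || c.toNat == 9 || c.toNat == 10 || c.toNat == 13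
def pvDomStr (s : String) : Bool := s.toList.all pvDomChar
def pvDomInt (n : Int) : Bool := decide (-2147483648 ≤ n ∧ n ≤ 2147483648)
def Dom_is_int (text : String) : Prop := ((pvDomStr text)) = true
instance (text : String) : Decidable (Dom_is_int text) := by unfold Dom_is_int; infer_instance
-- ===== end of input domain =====

-- B replaces A's guard ladder + per-character scan with one anchored regular expression
-- (0|-?[1-9][0-9]*); ported here as the explicit DFA that regex denotes (regex has no Lean counterpart).

-- ===== PORT A =====
def is_int (text : String) : Bool :=
  if text = "0" then true
  else if text = "" ∨ text = "-" then false
  else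
    -- text[0] / text[1:] on a string known nonempty: head/tail of its char list is exact here
    let text2 := if text.toList.head? = some '-' then text.toList.tail else text.toList
    if text2.head? = some '0' then false
    else text2.all (fun ch => decide (ch ∈ "1234567890".toList))

-- ===== PORT B =====
-- DFA for 0|-?[1-9][0-9]* : state 0 = start, 1 = after '-', 2 = matched "0",
-- 3 = inside [1-9][0-9]*, 4 = dead; accepting states are 2 and 3.
def dfaStep (s : Nat) (c : Char) : Nat :=
  if s = 0 then
    if c = '0' then 2
    else if c = '-' then 1
    else if c ∈ "123456789".toList then 3
    else 4
  else if s = 1 then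
    if c ∈ "123456789".toList then 3 else 4
  else if s = 3 then
    if c ∈ "0123456789".toList then 3 else 4
  else 4

def is_int_alt (text : String) : Bool :=
  let f := text.toList.foldl dfaStep 0
  f = 2 ∨ f = 3

-- ===== PRECONDITION & SPEC =====
def Spec_is_int (text : String) (out : Bool) : Prop := out = is_int_alt text
instance (text : String) (out : Bool) : Decidable (Spec_is_int text out) := by unfold Spec_is_int; infer_instance

-- ===== CLAIM (what is proved, stated in full; the proofs are below) =====
def Claim_equal_is_int : Prop := ∀ (text : String), Dom_is_int text → Spec_is_int text (is_int text)

-- ===== LEMMAS AND PROOFS =====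

theorem digitsA_eq : "1234567890".toList = ['1','2','3','4','5','6','7','8','9','0'] := by decide
theorem nz_eq : "123456789".toList = ['1','2','3','4','5','6','7','8','9'] := by decide
theorem dg_eq : "0123456789".toList = ['0','1','2','3','4','5','6','7','8','9'] := by decide

theorem dfaStep0 (c : Char) : dfaStep 0 c =
    (if c = '0' then 2 else if c = '-' then 1
     else if c ∈ (['1','2','3','4','5','6','7','8','9'] : List Char) then 3 else 4) := by
  unfold dfaStep; rw [if_pos rfl, nz_eq]

theorem dfaStep1 (c : Char) : dfaStep 1 c =
    (if c ∈ (['1','2','3','4','5','6','7','8','9'] : List Char) then 3 else 4) := by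
  unfold dfaStep; rw [if_neg (by decide), if_pos rfl, nz_eq]

theorem dfaStep2 (c : Char) : dfaStep 2 c = 4 := by
  unfold dfaStep; rw [if_neg (by decide), if_neg (by decide), if_neg (by decide)]

theorem dfaStep3 (c : Char) : dfaStep 3 c =
    (if c ∈ (['0','1','2','3','4','5','6','7','8','9'] : List Char) then 3 else 4) := by
  unfold dfaStep; rw [if_neg (by decide), if_neg (by decide), if_pos rfl, dg_eq]

theorem dfaStep4 (c : Char) : dfaStep 4 c = 4 := by
  unfold dfaStep; rw [if_neg (by decide), if_neg (by decide), if_neg (by decide)]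

theorem foldl_dead (l : List Char) : l.foldl dfaStep 4 = 4 := by
  induction l with
  | nil => rfl
  | cons c rest ih => rw [List.foldl_cons, dfaStep4]; exact ih

theorem foldl_two (c : Char) (rest : List Char) :
    ((c :: rest).foldl dfaStep 2) = 4 := by
  rw [List.foldl_cons, dfaStep2]; exact foldl_dead rest

theorem foldl_three (l : List Char) :
    l.foldl dfaStep 3 =
      if l.all (fun ch => decide (ch ∈ (['0','1','2','3','4','5','6','7','8','9'] : List Char))) then 3 else 4 := by
  induction l with
  | nil => rfl
  | cons c rest ih =>
    rw [List.foldl_cons, dfaStep3]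
    by_cases hc : c ∈ (['0','1','2','3','4','5','6','7','8','9'] : List Char)
    · rw [if_pos hc, ih, List.all_cons, decide_eq_true hc, Bool.true_and]
    · rw [if_neg hc, foldl_dead, List.all_cons, decide_eq_false hc, Bool.false_and,
        if_neg (by simp)]

theorem mem_digitsA_iff (c : Char) :
    c ∈ (['1','2','3','4','5','6','7','8','9','0'] : List Char)
      ↔ c ∈ (['0','1','2','3','4','5','6','7','8','9'] : List Char) := by
  simp; tauto

theorem mem_dg_iff (c : Char) :
    c ∈ (['0','1','2','3','4','5','6','7','8','9'] : List Char)
      ↔ c = '0' ∨ c ∈ (['1','2','3','4','5','6','7','8','9'] : List Char) := by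
  simp

theorem hall_iff (l : List Char) :
    (l.all (fun ch => decide (ch ∈ (['1','2','3','4','5','6','7','8','9','0'] : List Char))))
      = (l.all (fun ch => decide (ch ∈ (['0','1','2','3','4','5','6','7','8','9'] : List Char)))) := by
  induction l with
  | nil => rfl
  | cons x xs ih =>
    rw [List.all_cons, List.all_cons, ih]
    by_cases hx : x ∈ (['0','1','2','3','4','5','6','7','8','9'] : List Char)
    · rw [decide_eq_true hx, decide_eq_true ((mem_digitsA_iff x).mpr hx)]
    · rw [decide_eq_false hx, decide_eq_false (fun h => hx ((mem_digitsA_iff x).mp h))]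

-- core: A's post-strip value equals acceptance of the DFA run from state s (0 = no sign seen, 1 = sign consumed)
theorem accept_from_head (c : Char) (rest : List Char) (s : Nat)
    (hs : s = 0 ∨ s = 1) (hc : s = 0 → c ≠ '-') (h0 : c = '0' → s = 1 ∨ rest ≠ []) :
    ((if c = '0' then false
      else (c :: rest).all (fun ch => decide (ch ∈ (['1','2','3','4','5','6','7','8','9','0'] : List Char)))) = true)
    ↔ (((c :: rest).foldl dfaStep s) = 2 ∨ ((c :: rest).foldl dfaStep s) = 3) := by
  by_cases hzero : c = '0'
  · subst hzero
    rw [if_pos rfl]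
    rcases hs with rfl | rfl
    · rcases h0 rfl with h | h
      · omega
      · match rest, h with
        | r :: rs, _ =>
          rw [List.foldl_cons, dfaStep0, if_pos rfl, foldl_two]
          simp
    · rw [List.foldl_cons, dfaStep1, if_neg (by decide), foldl_dead]
      simp
  · rw [if_neg hzero]
    by_cases hnz : c ∈ (['1','2','3','4','5','6','7','8','9'] : List Char)
    · have hstep : dfaStep s c = 3 := by
        rcases hs with rfl | rfl
        · rw [dfaStep0, if_neg hzero, if_neg (hc rfl), if_pos hnz]
        · rw [dfaStep1, if_pos hnz]
      rw [List.foldl_cons, hstep, foldl_three, List.all_cons,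
        decide_eq_true ((mem_digitsA_iff c).mpr ((mem_dg_iff c).mpr (Or.inr hnz))),
        Bool.true_and, hall_iff]
      by_cases hall : rest.all (fun ch => decide (ch ∈ (['0','1','2','3','4','5','6','7','8','9'] : List Char)))
      · rw [hall, if_pos rfl]; simp
      · rw [Bool.eq_false_iff.mpr hall, if_neg (by simp)]; simp
    · have hnotdg : c ∉ (['0','1','2','3','4','5','6','7','8','9'] : List Char) := by
        rw [mem_dg_iff]; tauto
      have hstep : dfaStep s c = 4 := by
        rcases hs with rfl | rfl
        · rw [dfaStep0, if_neg hzero, if_neg (hc rfl), if_neg hnz]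
        · rw [dfaStep1, if_neg hnz]
      rw [List.foldl_cons, hstep, foldl_dead, List.all_cons,
        decide_eq_false (fun h => hnotdg ((mem_digitsA_iff c).mp h)), Bool.false_and]
      simp

-- main equivalence on the char list, for the non-edge-case branch of A
theorem main_list (l : List Char) (h0 : l ≠ ['0']) (hne : l ≠ []) (hnm : l ≠ ['-']) :
    (let l2 := if l.head? = some '-' then l.tail else l;
     if l2.head? = some '0' then false
     else l2.all (fun ch => decide (ch ∈ (['1','2','3','4','5','6','7','8','9','0'] : List Char))))
    = decide (l.foldl dfaStep 0 = 2 ∨ l.foldl dfaStep 0 = 3) := by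
  match l, hne with
  | c :: rest, _ =>
    by_cases hminus : c = '-'
    · subst hminus
      have hrest : rest ≠ [] := fun h => hnm (by rw [h])
      match rest, hrest with
      | d :: rs, _ =>
        have hfold : (('-' :: d :: rs).foldl dfaStep 0) = ((d :: rs).foldl dfaStep 1) := by
          rw [List.foldl_cons, dfaStep0, if_neg (by decide), if_pos rfl]
        have hacc := accept_from_head d rs 1 (Or.inr rfl) (by omega) (fun _ => Or.inl rfl)
        simp only [List.head?_cons, List.tail_cons, hfold]
        rw [Bool.eq_iff_iff, decide_eq_true_iff, ← hacc]
        by_cases hd : d = '0'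
        · simp [hd]
        · simp [hd]
    · have hacc := accept_from_head c rest 0 (Or.inl rfl) (fun _ => hminus)
        (fun hcv => Or.inr (fun h => h0 (by rw [hcv, h])))
      simp only [List.head?_cons, Option.some.injEq]
      rw [if_neg hminus, Bool.eq_iff_iff, decide_eq_true_iff, ← hacc]
      by_cases hc : c = '0'
      · simp [hc]
      · simp [hc]

-- ===== VERDICT (by name: the statement is the Claim_ definition above) =====
theorem is_int_spec : Claim_equal_is_int := by
  intro text _
  unfold Spec_is_int is_int is_int_alt
  by_cases h0 : text = "0"
  · subst h0; decide
  · by_cases hempty : text = "" ∨ text = "-"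
    · rcases hempty with rfl | rfl <;> decide
    · rw [if_neg h0, if_neg hempty]
      have h0' : text.toList ≠ ['0'] := fun h => h0 (String.toList_inj.mp (by rw [h]; rfl))
      have hne' : text.toList ≠ [] := fun h =>
        hempty (Or.inl (String.toList_inj.mp (by rw [h]; rfl)))
      have hnm' : text.toList ≠ ['-'] := fun h =>
        hempty (Or.inr (String.toList_inj.mp (by rw [h]; rfl)))
      have hm := main_list text.toList h0' hne' hnm'
      simp only [digitsA_eq]
      exact hm
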